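-- pv_equiv track=rewrite | github.com/axbryd/hXDP-Artifacts | parallelizer/ebpf_parser.py | copy_immediate
-- ===== SOURCE A (Python) =====
-- IMMEDIATE_SHIFT_MOD = 0
--
-- def little_to_big(instruct, size=8, signed=False):
--     return int.from_bytes(instruct.to_bytes(size, byteorder='little', signed=signed), byteorder='big', signed=signed)
--
-- def copy_immediate(instruct, immediate):
--     immediate = little_to_big(immediate, size=4)
--
--     for i in range(32):
--         bit = ((immediate & (1 << i)) != 0)
--         if bit == 0:
--             instruct &= ~(1 << (i + IMMEDIATE_SHIFT_MOD))
--         else: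
--             instruct |= (1 << (i + IMMEDIATE_SHIFT_MOD))
--     return instruct
-- ===== SOURCE B (Python) =====
-- IMMEDIATE_SHIFT_MOD = 0
--
-- def little_to_big(instruct, size=8, signed=False):
--     return int.from_bytes(instruct.to_bytes(size, byteorder='little', signed=signed), byteorder='big', signed=signed)
--
-- def copy_immediate(instruct, immediate):
--     imm = little_to_big(immediate, size=4)
--     return (instruct & ~0xFFFFFFFF) | imm
-- ===== Notes on version B (the rewrite author's own statement) =====
-- stated objective: simpler
-- what changed: Replaces the 32-iteration per-bit clear/set loop with a single mask-and-or expression: clear the low 32 bits of instruct and OR in the byte-swapped immediate.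
import Mathlib
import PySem

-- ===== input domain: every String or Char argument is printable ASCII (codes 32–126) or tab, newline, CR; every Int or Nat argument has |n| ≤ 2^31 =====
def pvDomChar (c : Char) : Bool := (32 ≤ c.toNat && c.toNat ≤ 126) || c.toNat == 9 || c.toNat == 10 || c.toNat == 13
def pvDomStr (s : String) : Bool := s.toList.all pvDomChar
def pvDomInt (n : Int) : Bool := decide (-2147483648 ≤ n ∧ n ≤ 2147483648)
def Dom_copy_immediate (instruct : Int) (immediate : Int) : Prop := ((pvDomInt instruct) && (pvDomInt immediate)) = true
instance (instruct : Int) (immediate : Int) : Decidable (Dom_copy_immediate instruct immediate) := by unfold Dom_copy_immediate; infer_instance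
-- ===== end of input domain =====

-- B replaces A's 32-iteration per-bit clear/set loop by one mask-and-or expression (simpler).

-- ===== PORT A =====
def IMMEDIATE_SHIFT_MOD : Nat := 0

-- port of little_to_big (A and B only call it with size=4, signed=False): byte i of n
-- little-endian, read back big-endian; exact for 0 ≤ n < 256^size (outside that range
-- Python's int.to_bytes raises OverflowError — those inputs are excluded by Pre_).
def little_to_big (n : Int) (size : Int) : Int :=
  (List.range size.toNat).foldl
    (fun acc i => acc * 256 + PySem.Int.mod (PySem.Int.floordiv n ((256:Int) ^ i)) 256) 0

-- the body of A's for-loop over i in range(32)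
def copyStep (immediate : Int) (inst : Int) (i : Nat) : Int :=
  let bit : Bool := decide (PySem.Int.band immediate (1 <<< i) ≠ 0)
  if bit = false then
    PySem.Int.band inst (Int.not (1 <<< (i + IMMEDIATE_SHIFT_MOD)))
  else
    PySem.Int.bor inst (1 <<< (i + IMMEDIATE_SHIFT_MOD))

def copy_immediate (instruct : Int) (immediate : Int) : Int :=
  (List.range 32).foldl (copyStep (little_to_big immediate 4)) instruct

-- ===== PORT B =====
def copy_immediate_alt (instruct : Int) (immediate : Int) : Int :=
  PySem.Int.bor (PySem.Int.band instruct (Int.not 4294967295)) (little_to_big immediate 4)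

-- ===== PRECONDITION & SPEC =====
-- Pre_ excludes exactly the inputs where Python A raises OverflowError (immediate.to_bytes(4)
-- needs 0 ≤ immediate < 2^32); B raises there identically.
def Pre_copy_immediate (instruct : Int) (immediate : Int) : Prop :=
  0 ≤ immediate ∧ immediate < 4294967296
instance (instruct : Int) (immediate : Int) : Decidable (Pre_copy_immediate instruct immediate) := by
  unfold Pre_copy_immediate; infer_instance

def pvWitness_copy_immediate : Int × Int := (-5, 7)

def Spec_copy_immediate (instruct : Int) (immediate : Int) (out : Int) : Prop := out = copy_immediate_alt instruct immediate
instance (instruct : Int) (immediate : Int) (out : Int) : Decidable (Spec_copy_immediate instruct immediate out) := by unfold Spec_copy_immediate; infer_instance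

-- ===== CLAIM (what is proved, stated in full; the proofs are below) =====
def Claim_equal_copy_immediate : Prop := ∀ (instruct : Int) (immediate : Int), Dom_copy_immediate instruct immediate → Pre_copy_immediate instruct immediate → Spec_copy_immediate instruct immediate (copy_immediate instruct immediate)

-- ===== LEMMAS AND PROOFS =====

theorem one_shl (i : Nat) : (1:Int) <<< i = ((2^i : Nat) : Int) := by
  simp [Int.shiftLeft_eq]

-- sign-branch evaluations of PySem's two's-complement band/bor -----------------

theorem negSucc_not_nonneg (a : Nat) : ¬ (0:Int) ≤ Int.negSucc a := by
  rw [Int.negSucc_eq]; omega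

theorem neg_negSucc_sub_one (a : Nat) : -Int.negSucc a - 1 = ((a:Nat):Int) := by
  rw [Int.negSucc_eq]; ring

theorem band_pn (a b : Nat) :
    PySem.Int.band ((a:Nat):Int) (Int.negSucc b) = ((a - (a &&& b) : Nat) : Int) := by
  unfold PySem.Int.band
  rw [if_pos (Int.natCast_nonneg a), if_neg (negSucc_not_nonneg b),
      neg_negSucc_sub_one, Int.toNat_natCast, Int.toNat_natCast]

theorem band_nn (a b : Nat) :
    PySem.Int.band (Int.negSucc a) (Int.negSucc b) = -((a ||| b : Nat) : Int) - 1 := by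
  unfold PySem.Int.band
  rw [if_neg (negSucc_not_nonneg a), if_neg (negSucc_not_nonneg b),
      neg_negSucc_sub_one, neg_negSucc_sub_one, Int.toNat_natCast, Int.toNat_natCast]

theorem bor_np (a b : Nat) :
    PySem.Int.bor (Int.negSucc a) ((b:Nat):Int) = -((a - (a &&& b) : Nat) : Int) - 1 := by
  unfold PySem.Int.bor
  rw [if_neg (negSucc_not_nonneg a), if_pos (Int.natCast_nonneg b),
      neg_negSucc_sub_one, Int.toNat_natCast, Int.toNat_natCast]

-- Nat bit lemmas ------------------------------------------------------------

theorem nat_and_bit (k t c : Nat) (hc : c < 2^k) :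
    (2^k*t + c) &&& 2^k = (t % 2) * 2^k := by
  rw [Nat.and_two_pow, Nat.testBit_mul_two_pow_add_eq]
  rw [Nat.testBit_lt_two_pow hc]
  rcases Nat.mod_two_eq_zero_or_one t with h | h <;> simp [h]

theorem nat_or_bit (k d b c : Nat) (hb : b < 2) (hc : c < 2^k) :
    (2^k*(2*d+b) + c) ||| 2^k = 2^k*(2*d+1) + c := by
  apply Nat.eq_of_testBit_eq
  intro i
  rw [Nat.testBit_or, Nat.testBit_two_pow_mul_add _ hc, Nat.testBit_two_pow_mul_add _ hc,
      Nat.testBit_two_pow]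
  rcases Nat.lt_or_ge i k with h | h
  · rw [if_pos h, if_pos h, decide_eq_false (by omega : ¬ k = i), Bool.or_false]
  · obtain ⟨j, rfl⟩ : ∃ j, i = k + j := ⟨i - k, by omega⟩
    rw [if_neg (by omega), if_neg (by omega)]
    have hjk : k + j - k = j := by omega
    rw [hjk]
    cases j with
    | zero =>
      rw [decide_eq_true (by omega : k = k + 0), Bool.or_true]
      have h1 : (2*d+1) % 2 = 1 := by omega
      rw [Nat.testBit_zero, h1]
      simp
    | succ j =>
      rw [decide_eq_false (by omega : ¬ k = k + (j+1)), Bool.or_false,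
          Nat.testBit_succ, Nat.testBit_succ]
      have e1 : (2*d+b)/2 = d := by omega
      have e2 : (2*d+1)/2 = d := by omega
      rw [e1, e2]

theorem nat_or_low_mask (n a : Nat) :
    a ||| (2^n - 1) = 2^n*(a/2^n) + (2^n - 1) := by
  have hp := Nat.two_pow_pos n
  apply Nat.eq_of_testBit_eq
  intro i
  rw [Nat.testBit_or, Nat.testBit_two_pow_sub_one,
      Nat.testBit_two_pow_mul_add _ (by omega : 2^n - 1 < 2^n), Nat.testBit_two_pow_sub_one]
  rcases Nat.lt_or_ge i n with h | h
  · simp [h]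
  · rw [if_neg (by omega), decide_eq_false (by omega : ¬ i < n), Bool.or_false]
    rw [← Nat.shiftRight_eq_div_pow, Nat.testBit_shiftRight]
    congr 1
    omega

theorem nat_and_low_mask (n t m : Nat) (hm : m < 2^n) :
    (2^n*t + (2^n - 1)) &&& m = m := by
  have hp := Nat.two_pow_pos n
  apply Nat.eq_of_testBit_eq
  intro i
  rw [Nat.testBit_and, Nat.testBit_two_pow_mul_add _ (by omega : 2^n - 1 < 2^n)]
  rcases Nat.lt_or_ge i n with h | h
  · rw [if_pos h, Nat.testBit_two_pow_sub_one, decide_eq_true h, Bool.true_and]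
  · have hmi : m.testBit i = false :=
      Nat.testBit_lt_two_pow (lt_of_lt_of_le hm (Nat.pow_le_pow_right (by norm_num) h))
    rw [hmi, Bool.and_false]

-- Int step lemmas -----------------------------------------------------------

theorem int_clear_bit (k : Nat) (q r : Int) (h0 : 0 ≤ r) (h1 : r < 2^k) :
    PySem.Int.band (2^k*q + r) (Int.not ((1:Int) <<< k)) = 2^(k+1) * (q / 2) + r := by
  obtain ⟨rn, rfl⟩ := Int.eq_ofNat_of_zero_le h0
  have hrn : rn < 2^k := by exact_mod_cast h1
  rw [one_shl]
  have hnot : Int.not (((2^k : Nat)) : Int) = Int.negSucc (2^k) := rfl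
  rw [hnot]
  cases q with
  | ofNat a =>
    obtain ⟨d, b, hb, rfl⟩ : ∃ d b, b < 2 ∧ a = 2*d + b := ⟨a/2, a%2, by omega, by omega⟩
    have hS : (2:Int)^k * (Int.ofNat (2*d+b)) + (rn:Int) = ((2^k*(2*d+b) + rn : Nat) : Int) := by
      rw [Int.ofNat_eq_natCast]; push_cast; ring
    rw [hS, band_pn, nat_and_bit k (2*d+b) rn hrn]
    have hmod : (2*d+b) % 2 = b := by omega
    rw [hmod]
    have hdiv : (Int.ofNat (2*d+b)) / 2 = (d:Int) := by rw [Int.ofNat_eq_natCast]; omega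
    rw [hdiv]
    have e : 2^k*(2*d+b) = 2^(k+1)*d + b*2^k := by rw [pow_succ]; ring
    have hN : 2^k*(2*d+b) + rn - b*2^k = 2^(k+1)*d + rn := by omega
    rw [hN]; push_cast; ring
  | negSucc t =>
    obtain ⟨d, b, hb, rfl⟩ : ∃ d b, b < 2 ∧ t = 2*d + b := ⟨t/2, t%2, by omega, by omega⟩
    have hc : 2^k - 1 - rn < 2^k := by have := Nat.two_pow_pos k; omega
    have hpc : ((2^k : Nat) : Int) = (2:Int)^k := by push_cast; ring
    have hcast : ((2^k - 1 - rn : Nat) : Int) = 2^k - 1 - rn := by omega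
    have hS : (2:Int)^k * Int.negSucc (2*d+b) + (rn:Int)
        = Int.negSucc (2^k*(2*d+b) + (2^k - 1 - rn)) := by
      rw [Int.negSucc_eq, Int.negSucc_eq]
      have h3 : ((2^k*(2*d+b) + (2^k-1-rn) : Nat) : Int)
          = (2:Int)^k * (2*d+b) + 2^k - 1 - rn := by
        push_cast [hcast]; ring
      rw [h3]; push_cast; ring
    rw [hS, band_nn, nat_or_bit k d b _ hb hc]
    have hdiv : Int.negSucc (2*d+b) / 2 = -((d:Int)+1) := by rw [Int.negSucc_eq]; omega
    rw [hdiv]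
    have h4 : ((2^k*(2*d+1) + (2^k-1-rn) : Nat) : Int) = (2:Int)^k*(2*d+1) + 2^k - 1 - rn := by
      push_cast [hcast]; ring
    rw [h4]; ring

theorem int_set_bit (k : Nat) (q r : Int) (h0 : 0 ≤ r) (h1 : r < 2^k) :
    PySem.Int.bor (2^k*q + r) ((1:Int) <<< k) = 2^(k+1) * (q / 2) + 2^k + r := by
  obtain ⟨rn, rfl⟩ := Int.eq_ofNat_of_zero_le h0
  have hrn : rn < 2^k := by exact_mod_cast h1
  rw [one_shl]
  cases q with
  | ofNat a =>
    obtain ⟨d, b, hb, rfl⟩ : ∃ d b, b < 2 ∧ a = 2*d + b := ⟨a/2, a%2, by omega, by omega⟩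
    have hS : (2:Int)^k * (Int.ofNat (2*d+b)) + (rn:Int) = ((2^k*(2*d+b) + rn : Nat) : Int) := by
      rw [Int.ofNat_eq_natCast]; push_cast; ring
    rw [hS, PySem.Int.bor_natCast, nat_or_bit k d b rn hb hrn]
    have hdiv : (Int.ofNat (2*d+b)) / 2 = (d:Int) := by rw [Int.ofNat_eq_natCast]; omega
    rw [hdiv]; push_cast; ring
  | negSucc t =>
    obtain ⟨d, b, hb, rfl⟩ : ∃ d b, b < 2 ∧ t = 2*d + b := ⟨t/2, t%2, by omega, by omega⟩
    have hp := Nat.two_pow_pos k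
    have hc : 2^k - 1 - rn < 2^k := by omega
    have hpc : ((2^k : Nat) : Int) = (2:Int)^k := by push_cast; ring
    have hcast : ((2^k - 1 - rn : Nat) : Int) = 2^k - 1 - rn := by omega
    have hS : (2:Int)^k * Int.negSucc (2*d+b) + (rn:Int)
        = Int.negSucc (2^k*(2*d+b) + (2^k - 1 - rn)) := by
      rw [Int.negSucc_eq, Int.negSucc_eq]
      have h3 : ((2^k*(2*d+b) + (2^k-1-rn) : Nat) : Int)
          = (2:Int)^k * (2*d+b) + 2^k - 1 - rn := by
        push_cast [hcast]; ring
      rw [h3]; push_cast; ring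
    rw [hS, bor_np, nat_and_bit k (2*d+b) _ hc]
    have hmod : (2*d+b) % 2 = b := by omega
    rw [hmod]
    have e : 2^k*(2*d+b) = 2^(k+1)*d + b*2^k := by rw [pow_succ]; ring
    have hN : 2^k*(2*d+b) + (2^k-1-rn) - b*2^k = 2^(k+1)*d + (2^k-1-rn) := by omega
    rw [hN]
    have hdiv : Int.negSucc (2*d+b) / 2 = -((d:Int)+1) := by rw [Int.negSucc_eq]; omega
    rw [hdiv]
    have h4 : ((2^(k+1)*d + (2^k-1-rn) : Nat) : Int) = (2:Int)^(k+1)*d + 2^k - 1 - rn := by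
      push_cast [hcast]; ring
    rw [h4]; ring

theorem int_mask_clear (n : Nat) (x : Int) :
    PySem.Int.band x (Int.not (((2^n - 1 : Nat) : Int))) = 2^n * (x / 2^n) := by
  have hp := Nat.two_pow_pos n
  have hnot : Int.not (((2^n - 1 : Nat)) : Int) = Int.negSucc (2^n - 1) := rfl
  rw [hnot]
  cases x with
  | ofNat a =>
    rw [show Int.ofNat a = ((a:Nat):Int) from rfl, band_pn, Nat.and_two_pow_sub_one_eq_mod]
    have hm := Nat.div_add_mod a (2^n)
    have hN : a - a % 2^n = 2^n*(a/2^n) := by omega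
    rw [hN]
    have hdiv : ((a:Nat):Int) / ((2:Int)^n) = ((a/2^n : Nat) : Int) := by norm_cast
    rw [hdiv]; push_cast; ring
  | negSucc a =>
    rw [band_nn, nat_or_low_mask]
    have hm := Nat.div_add_mod a (2^n)
    have hmlt := Nat.mod_lt a hp
    have hdiv : Int.negSucc a / ((2:Int)^n) = -((a/2^n : Nat) : Int) - 1 := by
      have hpos : (0:Int) < (2:Int)^n := by positivity
      refine ((Int.ediv_emod_unique (r := ((2^n - 1 - a % 2^n : Nat) : Int))
        (q := -((a/2^n : Nat) : Int) - 1) hpos).mpr ⟨?_, ?_, ?_⟩).1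
      · rw [Int.negSucc_eq]
        have hpc : ((2^n : Nat) : Int) = (2:Int)^n := by push_cast; ring
        have h5 : ((2^n - 1 - a % 2^n : Nat) : Int) = 2^n - 1 - ((a % 2^n : Nat) : Int) := by
          omega
        have h6 : ((a:Nat):Int) = (2:Int)^n * ((a/2^n : Nat):Int) + ((a % 2^n : Nat):Int) := by
          exact_mod_cast congrArg (Nat.cast : Nat → Int) hm.symm
        rw [h5]; push_cast at h6 ⊢; linarith [h6]
      · have : a % 2^n ≤ 2^n - 1 := by omega
        positivity
      · have hpc : ((2^n : Nat) : Int) = (2:Int)^n := by push_cast; ring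
        have h5 : ((2^n - 1 - a % 2^n : Nat) : Int) = 2^n - 1 - ((a % 2^n : Nat) : Int) := by
          omega
        rw [h5]
        have : (0:Int) ≤ ((a % 2^n : Nat) : Int) := by positivity
        have hpc : ((2^n : Nat) : Int) = (2:Int)^n := by push_cast; ring
        omega
    rw [hdiv]
    have hpc : ((2^n : Nat) : Int) = (2:Int)^n := by push_cast; ring
    have hq : ((2^n*(a/2^n) : Nat) : Int) = (2:Int)^n * ((a/2^n : Nat) : Int) := by
      push_cast; ring
    have h7 : ((2^n*(a/2^n) + (2^n - 1) : Nat) : Int)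
        = (2:Int)^n * ((a/2^n : Nat) : Int) + 2^n - 1 := by
      omega
    rw [h7]; ring

theorem int_or_low (n : Nat) (q : Int) (m : Nat) (hm : m < 2^n) :
    PySem.Int.bor (2^n * q) (m : Int) = 2^n * q + m := by
  have hp := Nat.two_pow_pos n
  cases q with
  | ofNat a =>
    have hS : (2:Int)^n * (Int.ofNat a) = ((2^n*a : Nat) : Int) := by
      rw [Int.ofNat_eq_natCast]; push_cast; ring
    rw [hS, PySem.Int.bor_natCast]
    have hsl : a <<< n = 2^n*a := by rw [Nat.shiftLeft_eq]; ring
    have := Nat.shiftLeft_add_eq_or_of_lt hm a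
    rw [hsl] at this
    rw [← this]; push_cast; ring
  | negSucc t =>
    have hS : (2:Int)^n * Int.negSucc t = Int.negSucc (2^n*t + (2^n - 1)) := by
      rw [Int.negSucc_eq, Int.negSucc_eq]
      have hpc : ((2^n : Nat) : Int) = (2:Int)^n := by push_cast; ring
      have h8 : ((2^n - 1 : Nat) : Int) = (2:Int)^n - 1 := by
        have h : ((2^n - 1 : Nat) : Int) = ((2^n : Nat) : Int) - 1 := by omega
        rw [h, hpc]
      have h3 : ((2^n*t + (2^n-1) : Nat) : Int) = (2:Int)^n * t + 2^n - 1 := by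
        push_cast [h8]; ring
      rw [h3]; ring
    rw [hS, bor_np, nat_and_low_mask n t m hm]
    have hpc2 : ((2^n : Nat) : Int) = (2:Int)^n := by push_cast; ring
    have h8 : ((2^n - 1 : Nat) : Int) = (2:Int)^n - 1 := by
      have h : ((2^n - 1 : Nat) : Int) = ((2^n : Nat) : Int) - 1 := by omega
      rw [h, hpc2]
    have h5 : ((2^n*t : Nat) : Int) = (2:Int)^n * t := by push_cast; ring
    have hNm : 2^n*t + (2^n-1) - m + m = 2^n*t + (2^n-1) := by omega
    have hNm' : ((2^n*t + (2^n-1) - m : Nat) : Int) + m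
        = ((2^n*t : Nat) : Int) + ((2^n - 1 : Nat) : Int) := by
      exact_mod_cast congrArg (Nat.cast (R := Int)) hNm
    have h4 : ((2^n*t + (2^n-1) - m : Nat) : Int) = (2:Int)^n * t + 2^n - 1 - m := by
      rw [h5, h8] at hNm'; linarith
    rw [h4, Int.negSucc_eq]; push_cast [h5, h8]; ring

-- the loop condition is exactly a testBit ------------------------------------

theorem band_bit (m i : Nat) :
    (decide (PySem.Int.band (m:Int) ((1:Int) <<< i) ≠ 0)) = m.testBit i := by
  rw [one_shl, PySem.Int.band_natCast, Nat.and_two_pow]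
  have hp := Nat.two_pow_pos i
  cases htb : m.testBit i <;> simp

-- loop characterisation ------------------------------------------------------

theorem loop_closed (m : Nat) : ∀ (n : Nat) (inst : Int),
    (List.range n).foldl (copyStep (m : Int)) inst
      = 2^n * (inst / 2^n) + ((m % 2^n : Nat) : Int) := by
  intro n
  induction n with
  | zero => intro inst; simp
  | succ n ih =>
    intro inst
    rw [List.range_succ, List.foldl_append, List.foldl_cons, List.foldl_nil, ih]
    simp only [copyStep, IMMEDIATE_SHIFT_MOD, Nat.add_zero]
    have hsh : ((1 <<< n : Nat) : Int) = (1:Int) <<< n := by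
      rw [one_shl, Nat.shiftLeft_eq, Nat.one_mul]
    rw [hsh, band_bit]
    have hdd : inst / 2^n / 2 = inst / 2^(n+1) := by
      rw [Int.ediv_ediv_of_nonneg (by positivity), ← pow_succ]
    have hr0 : (0:Int) ≤ ((m % 2^n : Nat) : Int) := by positivity
    have hr1 : ((m % 2^n : Nat) : Int) < 2^n := by
      exact_mod_cast Nat.mod_lt _ (Nat.two_pow_pos n)
    have hmod : m % 2^(n+1) = m % 2^n + 2^n * (m / 2^n % 2) := by
      rw [pow_succ, Nat.mod_mul]
    have htb2 : m.testBit n = decide (m / 2^n % 2 = 1) := Nat.testBit_eq_decide_div_mod_eq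
    cases htb : m.testBit n with
    | false =>
      rw [if_pos rfl, int_clear_bit n _ _ hr0 hr1, hdd]
      have hz : m / 2^n % 2 = 0 := by
        rw [htb] at htb2
        have := Nat.mod_two_eq_zero_or_one (m / 2^n)
        rcases this with h | h
        · exact h
        · rw [h] at htb2; simp at htb2
      rw [hmod, hz]
      simp
    | true =>
      rw [if_neg (by simp), int_set_bit n _ _ hr0 hr1, hdd]
      have hz : m / 2^n % 2 = 1 := by
        rw [htb] at htb2
        have := Nat.mod_two_eq_zero_or_one (m / 2^n)
        rcases this with h | h
        · rw [h] at htb2; simp at htb2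
        · exact h
      rw [hmod, hz]
      push_cast; ring

theorem ltb_bounds (n : Int) : 0 ≤ little_to_big n 4 ∧ little_to_big n 4 < 4294967296 := by
  have hb : ∀ x : Int, 0 ≤ PySem.Int.mod x 256 ∧ PySem.Int.mod x 256 < 256 := by
    intro x
    rw [PySem.Int.mod_eq_emod_of_pos (by norm_num)]
    exact ⟨Int.emod_nonneg _ (by norm_num), Int.emod_lt_of_pos _ (by norm_num)⟩
  unfold little_to_big
  have hr : List.range ((4:Int).toNat) = [0, 1, 2, 3] := rfl
  rw [hr]
  simp only [List.foldl_cons, List.foldl_nil]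
  obtain ⟨a0, b0⟩ := hb (PySem.Int.floordiv n ((256:Int)^0))
  obtain ⟨a1, b1⟩ := hb (PySem.Int.floordiv n ((256:Int)^1))
  obtain ⟨a2, b2⟩ := hb (PySem.Int.floordiv n ((256:Int)^2))
  obtain ⟨a3, b3⟩ := hb (PySem.Int.floordiv n ((256:Int)^3))
  constructor <;> omega

-- ===== VERDICT (by name: the statement is the Claim_ definition above) =====
theorem copy_immediate_spec : Claim_equal_copy_immediate := by
  intro instruct immediate _ _
  unfold Spec_copy_immediate copy_immediate copy_immediate_alt
  obtain ⟨h0, h1⟩ := ltb_bounds immediate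
  obtain ⟨mv, hv⟩ := Int.eq_ofNat_of_zero_le h0
  rw [hv] at h1 ⊢
  have hmv : mv < 2^32 := by exact_mod_cast h1
  rw [loop_closed mv 32 instruct, Nat.mod_eq_of_lt hmv]
  have hlit : ((2^32 - 1 : Nat) : Int) = 4294967295 := by norm_num
  rw [← hlit, int_mask_clear 32 instruct, int_or_low 32 _ mv hmv]
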